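-- pv_equiv track=rewrite | github.com/bagofwords1/bagofwords | backend/app/core/spa.py | _is_api_path
-- ===== SOURCE A (Python) =====
-- API_PREFIXES = (
--     "api/",
--     "ws/",
--     "mcp",
--     "excel",
--     "scim/",
--     ".well-known/",
--     "slack_webhook",
--     "teams_webhook",
--     "whatsapp_webhook",
--     "swagger",
--     "openapi.json",
--     "_nuxt_icon",
--     "health",
-- )
--
-- def _is_api_path(path: str) -> bool:
--     p = path.lstrip("/")
--     for prefix in API_PREFIXES:
--         if prefix.endswith("/"):
--             if p.startswith(prefix) or p == prefix.rstrip("/"):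
--                 return True
--         else:
--             if p == prefix or p.startswith(prefix + "/"):
--                 return True
--     return False
-- ===== SOURCE B (Python) =====
-- _API_SEGMENTS = frozenset((
--     "api", "ws", "mcp", "excel", "scim", ".well-known",
--     "slack_webhook", "teams_webhook", "whatsapp_webhook",
--     "swagger", "openapi.json", "_nuxt_icon", "health",
-- ))
--
-- def _is_api_path(path: str) -> bool:
--     # scan past leading slashes, then to the end of the first segment
--     n = len(path)
--     i = 0
--     while i < n and path[i] == '/':
--         i += 1
--     j = i
--     while j < n and path[j] != '/':
--         j += 1
--     return path[i:j] in _API_SEGMENTS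
-- ===== Notes on version B (the rewrite author's own statement) =====
-- stated objective: simpler
-- what changed: Replaces A's loop over all 13 prefixes with per-prefix endswith/startswith/rstrip branching by a two-pointer character scan that isolates the first path segment once and tests membership in a literal frozenset of segment names.
import Mathlib
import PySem

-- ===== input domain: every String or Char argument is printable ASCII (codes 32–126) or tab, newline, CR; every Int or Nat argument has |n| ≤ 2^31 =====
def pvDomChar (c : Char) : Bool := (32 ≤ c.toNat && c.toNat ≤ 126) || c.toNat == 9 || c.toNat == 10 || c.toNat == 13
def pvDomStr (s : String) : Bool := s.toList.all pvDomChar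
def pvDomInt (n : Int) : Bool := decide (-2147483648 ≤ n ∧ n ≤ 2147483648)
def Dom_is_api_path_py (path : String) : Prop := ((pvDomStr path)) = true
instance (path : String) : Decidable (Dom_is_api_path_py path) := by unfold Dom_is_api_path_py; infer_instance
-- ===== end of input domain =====

-- B replaces A's per-prefix loop (endswith/startswith/rstrip branching) by one character
-- scan that isolates the first path segment, then a membership test in a literal set of
-- segment names (objective: simpler).

-- ===== PORT A =====
-- shared-module constant API_PREFIXES, as lists of chars
def pyApiPrefixes : List (List Char) :=
  ["api/".toList, "ws/".toList, "mcp".toList, "excel".toList, "scim/".toList,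
   ".well-known/".toList, "slack_webhook".toList, "teams_webhook".toList,
   "whatsapp_webhook".toList, "swagger".toList, "openapi.json".toList,
   "_nuxt_icon".toList, "health".toList]

-- s.lstrip("/") : drop leading '/' code points (exact: Python lstrip with an explicit char set)
def pyLstripSlash (s : List Char) : List Char := s.dropWhile (fun c => c == '/')

-- s.rstrip("/") : drop trailing '/' code points (exact: Python rstrip with an explicit char set)
def pyRstripSlash (s : List Char) : List Char := (s.reverse.dropWhile (fun c => c == '/')).reverse

-- A's for-loop over API_PREFIXES, with both branches in source order
def isApiLoop (p : List Char) : List (List Char) → Bool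
  | [] => false
  | pfx :: rest =>
    if PySem.Chars.endswith pfx ['/'] then
      if PySem.Chars.startswith p pfx || p == pyRstripSlash pfx then true else isApiLoop p rest
    else
      if p == pfx || PySem.Chars.startswith p (pfx ++ ['/']) then true else isApiLoop p rest

def is_api_path_py (path : String) : Bool :=
  isApiLoop (pyLstripSlash path.toList) pyApiPrefixes

-- ===== PORT B =====
-- the literal frozenset _API_SEGMENTS from Source B
def bApiSegments : PySem.Set (List Char) :=
  PySem.Set.ofList
    ["api".toList, "ws".toList, "mcp".toList, "excel".toList, "scim".toList,
     ".well-known".toList, "slack_webhook".toList, "teams_webhook".toList,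
     "whatsapp_webhook".toList, "swagger".toList, "openapi.json".toList,
     "_nuxt_icon".toList, "health".toList]

-- Source B's second while loop: advance j to the first '/', yielding path[i:j]
def bSegTake : List Char → List Char
  | [] => []
  | c :: cs => if c = '/' then [] else c :: bSegTake cs

-- Source B's first while loop: advance i past leading slashes, then hand over to the second
def bSegScan : List Char → List Char
  | [] => []
  | c :: cs => if c = '/' then bSegScan cs else c :: bSegTake cs

def is_api_path_py_alt (path : String) : Bool :=
  PySem.Set.contains bApiSegments (bSegScan path.toList)

-- ===== PRECONDITION & SPEC =====
def Spec_is_api_path_py (path : String) (out : Bool) : Prop := out = is_api_path_py_alt path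
instance (path : String) (out : Bool) : Decidable (Spec_is_api_path_py path out) := by unfold Spec_is_api_path_py; infer_instance

-- ===== CLAIM (what is proved, stated in full; the proofs are below) =====
def Claim_equal_is_api_path_py : Prop := ∀ (path : String), Dom_is_api_path_py path → Spec_is_api_path_py path (is_api_path_py path)

-- ===== LEMMAS AND PROOFS =====

lemma bSegTake_eq_takeWhile (s : List Char) :
    bSegTake s = s.takeWhile (fun c => !(c == '/')) := by
  induction s with
  | nil => rfl
  | cons c cs ih =>
    by_cases hc : c = '/' <;>
      simp [bSegTake, hc, List.takeWhile_cons, ih]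

lemma bSegScan_eq (s : List Char) :
    bSegScan s = (s.dropWhile (fun c => c == '/')).takeWhile (fun c => !(c == '/')) := by
  induction s with
  | nil => rfl
  | cons c cs ih =>
    by_cases hc : c = '/'
    · simp [bSegScan, hc, List.dropWhile, ih]
    · have hfe : (c == '/') = false := beq_eq_false_iff_ne.mpr hc
      simp [bSegScan, hc, List.dropWhile, hfe, bSegTake_eq_takeWhile, List.takeWhile_cons]

-- the first segment of p is b  ↔  p starts with "b/" or p is exactly b  (b slash-free)
lemma takeWhile_seg_iff (b : List Char) (hb : '/' ∉ b) (p : List Char) :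
    p.takeWhile (fun c => !(c == '/')) = b ↔ ((b ++ ['/']) <+: p ∨ p = b) := by
  induction b generalizing p with
  | nil =>
    cases p with
    | nil => simp
    | cons c cs =>
      by_cases hc : c = '/'
      · subst hc; simp
      · simp [hc, List.cons_prefix_cons]
        exact fun h => hc h.symm
  | cons a b ih =>
    have ha : a ≠ '/' := fun h => hb (h ▸ List.mem_cons_self)
    have hb' : '/' ∉ b := fun h => hb (List.mem_cons_of_mem a h)
    cases p with
    | nil => simp
    | cons c cs =>
      by_cases hc : c = '/'
      · subst hc
        simp [List.cons_prefix_cons, Ne.symm ha, ha]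
      · by_cases hca : c = a
        · subst hca
          simp [hc, List.cons_prefix_cons, ih hb' cs]
        · simp [hc, List.cons_prefix_cons, hca]
          exact fun h => absurd h.symm hca

lemma seg_eq_iff (b : List Char) (hb : '/' ∉ b) (p : List Char) :
    (PySem.Chars.startswith p (b ++ ['/']) || (p == b))
      = (p.takeWhile (fun c => !(c == '/')) == b) := by
  rw [Bool.eq_iff_iff]
  simp only [Bool.or_eq_true, beq_iff_eq, PySem.Chars.startswith_iff]
  rw [takeWhile_seg_iff b hb p]

-- every API prefix is its rstrip base, or that base plus a trailing slash; base slash-free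
def GoodPrefix (x : List Char) : Prop :=
  '/' ∉ pyRstripSlash x ∧ (x = pyRstripSlash x ∨ x = pyRstripSlash x ++ ['/'])

lemma loop_eq_contains (p : List Char) (pfxs : List (List Char))
    (h : ∀ x ∈ pfxs, GoodPrefix x) :
    isApiLoop p pfxs
      = (pfxs.map pyRstripSlash).contains (p.takeWhile (fun c => !(c == '/'))) := by
  induction pfxs with
  | nil => simp [isApiLoop]
  | cons x rest ih =>
    obtain ⟨hnos, hform⟩ := h x List.mem_cons_self
    have hrest := ih (fun y hy => h y (List.mem_cons_of_mem x hy))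
    have key : (PySem.Chars.startswith p (pyRstripSlash x ++ ['/']) || (p == pyRstripSlash x))
        = (p.takeWhile (fun c => !(c == '/')) == pyRstripSlash x) :=
      seg_eq_iff (pyRstripSlash x) hnos p
    rcases hform with hcase | hcase
    · -- x has no trailing slash
      have hends : PySem.Chars.endswith x ['/'] = false := by
        rw [Bool.eq_false_iff]
        intro hc
        rw [PySem.Chars.endswith_iff] at hc
        rcases hc with ⟨t, ht⟩
        have hmem : '/' ∈ x := by rw [← ht]; simp
        rw [hcase] at hmem; exact hnos hmem
      rw [isApiLoop, hends]
      simp only [Bool.false_eq_true, if_false, List.map_cons, List.contains_cons]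
      rw [← hcase] at key ⊢
      have hcond : (p == x || PySem.Chars.startswith p (x ++ ['/']))
          = (p.takeWhile (fun c => !(c == '/')) == x) := by
        rw [← key]; exact Bool.or_comm _ _
      rw [hcond]
      cases hseg : (p.takeWhile (fun c => !(c == '/')) == x) <;>
        simp [hrest]
    · -- x ends with a slash
      have hends : PySem.Chars.endswith x ['/'] = true := by
        rw [PySem.Chars.endswith_iff, hcase]
        exact ⟨pyRstripSlash x, rfl⟩
      rw [isApiLoop, hends]
      rw [show PySem.Chars.startswith p x
            = PySem.Chars.startswith p (pyRstripSlash x ++ ['/']) by rw [← hcase]] at *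
      simp only [if_true, List.map_cons, List.contains_cons]
      rw [key]
      cases hseg : (p.takeWhile (fun c => !(c == '/')) == pyRstripSlash x) <;>
        simp [hrest]

-- B's literal segment set is exactly the rstrip of A's prefix list
lemma segments_contains (p : List Char) :
    PySem.Set.contains bApiSegments p = (pyApiPrefixes.map pyRstripSlash).contains p := by
  have h : bApiSegments = pyApiPrefixes.map pyRstripSlash := by decide
  rw [h]
  simp [PySem.Set.contains]

-- ===== VERDICT (by name: the statement is the Claim_ definition above) =====
theorem is_api_path_py_spec : Claim_equal_is_api_path_py := by
  intro path _
  unfold Spec_is_api_path_py is_api_path_py is_api_path_py_alt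
  rw [segments_contains, bSegScan_eq]
  refine loop_eq_contains _ _ ?_
  intro x hx
  fin_cases hx <;> exact ⟨by decide, by decide⟩
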